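-- pv_equiv track=rewrite | github.com/skygazer42/pyimgano | pyimgano/reporting/deploy_bundle_contract_helpers.py | build_artifact_roles
-- ===== SOURCE A (Python) =====
-- from typing import Any, Mapping
--
-- def build_artifact_roles(entries: list[dict[str, Any]]) -> dict[str, list[str]]:
--     roles: dict[str, list[str]] = {}
--     for entry in entries:
--         rel_path = entry.get("path", None)
--         if not isinstance(rel_path, str) or not rel_path.strip():
--             continue
--         role = entry.get("role", None)
--         if not isinstance(role, str) or not role.strip():
--             continue
--         roles.setdefault(str(role), []).append(str(rel_path))
--     return {
--         str(role): sorted(paths)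
--         for role, paths in sorted(roles.items(), key=lambda item: str(item[0]))
--     }
-- ===== SOURCE B (Python) =====
-- import itertools
--
--
-- def _valid_pair(entry):
--     rel_path = entry.get("path", None)
--     if not isinstance(rel_path, str) or not rel_path.strip():
--         return None
--     role = entry.get("role", None)
--     if not isinstance(role, str) or not role.strip():
--         return None
--     return (str(role), str(rel_path))
--
--
-- def build_artifact_roles(entries):
--     pairs = []
--     for entry in entries:
--         pair = _valid_pair(entry)
--         if pair is not None:
--             pairs.append(pair)
--     pairs.sort()
--     return {role: [path for _, path in group]
--             for role, group in itertools.groupby(pairs, key=lambda rp: rp[0])}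
-- ===== Notes on version B (the rewrite author's own statement) =====
-- stated objective: alternative
-- what changed: A groups paths into a role-keyed dict and then sorts the key list and each group separately; B collects the valid (role, path) pairs into one flat list, sorts it once by the (role, path) tuple, and rebuilds the output in a single itertools.groupby pass over the sorted pairs.
import Mathlib
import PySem

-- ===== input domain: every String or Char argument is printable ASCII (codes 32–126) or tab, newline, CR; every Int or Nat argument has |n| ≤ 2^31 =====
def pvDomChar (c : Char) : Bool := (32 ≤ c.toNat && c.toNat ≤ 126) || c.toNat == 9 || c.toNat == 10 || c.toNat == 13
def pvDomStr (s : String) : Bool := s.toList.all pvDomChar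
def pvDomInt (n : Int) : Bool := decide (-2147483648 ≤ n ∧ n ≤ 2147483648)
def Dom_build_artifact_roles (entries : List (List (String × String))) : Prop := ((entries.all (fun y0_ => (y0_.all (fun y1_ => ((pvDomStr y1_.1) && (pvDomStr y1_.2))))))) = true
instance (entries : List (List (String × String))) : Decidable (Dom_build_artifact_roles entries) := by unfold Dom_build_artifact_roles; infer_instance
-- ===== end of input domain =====

-- B replaces A's group-into-dict-then-sort-each-group strategy by collect-pairs, one tuple sort, then a single groupby pass (alternative decomposition, same cost).


-- ===== PORT A =====
-- one iteration of A's loop; `roles.setdefault(role, []).append(path)` is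
-- `roles.modify role [] (· ++ [path])`: the value is extended in place if the key
-- exists, otherwise (role, [path]) is appended at the end — exactly setdefault+append.
-- (values are always str here, so A's isinstance guards reduce to the strip tests)
def braStepA (roles : PySem.Dict String (List String)) (entry : List (String × String)) :
    PySem.Dict String (List String) :=
  match (PySem.Dict.ofList entry).get? "path" with
  | none => roles
  | some rel_path =>
    if PySem.Str.strip rel_path = "" then roles
    else
      match (PySem.Dict.ofList entry).get? "role" with
      | none => roles
      | some role =>
        if PySem.Str.strip role = "" then roles
        else roles.modify role [] (fun ps => ps ++ [rel_path])

def build_artifact_roles (entries : List (List (String × String))) : List (String × List String) :=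
  let roles := entries.foldl braStepA (PySem.Dict.mk [])
  (PySem.List.sorted roles.items (fun it => it.1)).map
    (fun it => (it.1, PySem.List.sorted it.2 (fun p => p)))

-- ===== PORT B =====
-- _valid_pair: the same two guards, returning the (role, path) tuple or None
def braValid? (entry : List (String × String)) : Option (String × String) :=
  match (PySem.Dict.ofList entry).get? "path" with
  | none => none
  | some rel_path =>
    if PySem.Str.strip rel_path = "" then none
    else
      match (PySem.Dict.ofList entry).get? "role" with
      | none => none
      | some role =>
        if PySem.Str.strip role = "" then none
        else some (role, rel_path)

-- itertools.groupby on the sorted pair list, keyed on the role, values projected to paths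
def braGroup : List (String × String) → List (String × List String)
  | [] => []
  | (r, p) :: rest =>
    (r, p :: (rest.takeWhile (fun rp => rp.1 == r)).map (·.2)) ::
      braGroup (rest.dropWhile (fun rp => rp.1 == r))
termination_by l => l.length
decreasing_by
  simp only [List.length_cons]
  exact Nat.lt_succ_of_le (List.length_dropWhile_le _ _)

def build_artifact_roles_alt (entries : List (List (String × String))) : List (String × List String) :=
  let pairs := entries.foldl
    (fun acc e => match braValid? e with | some rp => acc ++ [rp] | none => acc) []
  braGroup (PySem.List.sorted2 pairs (fun rp => rp.1) (fun rp => rp.2))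

-- ===== PRECONDITION & SPEC =====
def Spec_build_artifact_roles (entries : List (List (String × String))) (out : List (String × List String)) : Prop := out = build_artifact_roles_alt entries
instance (entries : List (List (String × String))) (out : List (String × List String)) : Decidable (Spec_build_artifact_roles entries out) := by unfold Spec_build_artifact_roles; infer_instance

-- ===== CLAIM (what is proved, stated in full; the proofs are below) =====
def Claim_equal_build_artifact_roles : Prop := ∀ (entries : List (List (String × String))), Dom_build_artifact_roles entries → Spec_build_artifact_roles entries (build_artifact_roles entries)

-- ===== LEMMAS AND PROOFS =====

-- the valid (role, path) pairs, in entry order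
def braPairs (entries : List (List (String × String))) : List (String × String) :=
  entries.flatMap (fun e => (braValid? e).toList)

-- distinct roles in first-occurrence order
def braRoles (ps : List (String × String)) : List String :=
  PySem.List.dedup (ps.map (·.1))

-- the paths recorded under role r, in pair order
def braG (ps : List (String × String)) (r : String) : List String :=
  (ps.filter (fun rp => rp.1 == r)).map (·.2)

-- the canonical value both programs compute
def braCanon (ps : List (String × String)) : List (String × List String) :=
  (PySem.List.sorted (braRoles ps) (fun r => r)).map
    (fun r => (r, PySem.List.sorted (braG ps r) (fun p => p)))

-- the sorted pair list, written as sorted role blocks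
def braFlat (ps : List (String × String)) : List (String × String) :=
  (PySem.List.sorted (braRoles ps) (fun r => r)).flatMap
    (fun r => (PySem.List.sorted (braG ps r) (fun p => p)).map (fun p => (r, p)))

def braStep' (d : PySem.Dict String (List String)) (rp : String × String) :
    PySem.Dict String (List String) :=
  d.modify rp.1 [] (fun ps => ps ++ [rp.2])

lemma braStepA_eq (d : PySem.Dict String (List String)) (e : List (String × String)) :
    braStepA d e = match braValid? e with | none => d | some rp => braStep' d rp := by
  unfold braStepA braValid? braStep'
  cases (PySem.Dict.ofList e).get? "path" with
  | none => rfl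
  | some p =>
    by_cases h : PySem.Str.strip p = ""
    · simp [h]
    · simp only [h, if_false]
      cases (PySem.Dict.ofList e).get? "role" with
      | none => rfl
      | some r =>
        by_cases h2 : PySem.Str.strip r = "" <;> simp [h2]

lemma foldl_braStepA (entries : List (List (String × String)))
    (d : PySem.Dict String (List String)) :
    entries.foldl braStepA d = (braPairs entries).foldl braStep' d := by
  induction entries generalizing d with
  | nil => rfl
  | cons e t ih =>
    simp only [List.foldl_cons, braPairs, List.flatMap_cons, braStepA_eq]
    cases h : braValid? e with
    | none => simp [ih, braPairs]
    | some rp => simp [ih, braPairs]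

lemma foldl_braAppend (entries : List (List (String × String))) (acc : List (String × String)) :
    entries.foldl (fun acc e => match braValid? e with | some rp => acc ++ [rp] | none => acc) acc
      = acc ++ braPairs entries := by
  induction entries generalizing acc with
  | nil => simp [braPairs]
  | cons e t ih =>
    simp only [List.foldl_cons, braPairs, List.flatMap_cons]
    cases h : braValid? e with
    | none => simp [ih, braPairs]
    | some rp => simp [ih, braPairs]

lemma getD_foldl_braStep' (ps : List (String × String)) (d : PySem.Dict String (List String))
    (r : String) :
    (ps.foldl braStep' d).getD r [] = d.getD r [] ++ braG ps r := by
  induction ps generalizing d with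
  | nil => simp [braG]
  | cons rp t ih =>
    simp only [List.foldl_cons, ih, braG, List.filter_cons]
    by_cases h : r = rp.1
    · simp [braStep', PySem.Dict.modify, h]
    · have hb : (rp.1 == r) = false := by simp [Ne.symm h]
      simp [braStep', PySem.Dict.modify, PySem.Dict.getD_insert, h, hb]

lemma keys_foldl_braStep' (ps : List (String × String)) :
    (ps.foldl braStep' (PySem.Dict.mk [])).keys = braRoles ps := by
  have h := PySem.Dict.keys_foldl_modify_key ps (fun rp => rp.1) ([] : List String)
      (fun _ rp => (fun l => l ++ [rp.2])) (PySem.Dict.mk [])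
  have hstep : (List.foldl (fun d (x : String × String) =>
      d.modify x.1 ([] : List String) ((fun _ rp => (fun l => l ++ [rp.2])) d x)) (PySem.Dict.mk []) ps)
      = ps.foldl braStep' (PySem.Dict.mk []) := rfl
  rw [hstep] at h
  rw [h]
  show PySem.Set.update (PySem.Dict.mk ([] : List (String × List String))).keys _ = _
  rw [braRoles, PySem.List.dedup_eq_ofList]
  rfl

lemma nodup_keys_foldl_braStep' (ps : List (String × String)) :
    (ps.foldl braStep' (PySem.Dict.mk [])).keys.Nodup :=
  PySem.Dict.nodup_keys_foldl_modify_key ps (fun rp => rp.1) ([] : List String)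
    (fun _ rp => (fun l => l ++ [rp.2])) (PySem.Dict.mk []) (by simp [PySem.Dict.keys])

lemma items_foldl_braStep' (ps : List (String × String)) :
    (ps.foldl braStep' (PySem.Dict.mk [])).items
      = (braRoles ps).map (fun r => (r, braG ps r)) := by
  rw [PySem.Dict.items_eq_map_keys _ (nodup_keys_foldl_braStep' ps) ([] : List String),
    keys_foldl_braStep']
  refine List.map_congr_left (fun r _ => ?_)
  rw [getD_foldl_braStep']
  simp [PySem.Dict.getD, PySem.Dict.get?]

lemma sortedRoles_pairwise_lt (ps : List (String × String)) :
    (PySem.List.sorted (braRoles ps) (fun r => r)).Pairwise (· < ·) := by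
  have hnd : (PySem.List.sorted (braRoles ps) (fun r => r)).Nodup :=
    (PySem.List.sorted_perm (braRoles ps) (fun r => r) false).nodup_iff.mpr
      (PySem.List.nodup_dedup _)
  have hle := PySem.List.sorted_pairwise (braRoles ps) (fun r => r)
  exact (hle.and hnd).imp (fun h => lt_of_le_of_ne h.1 h.2)

lemma sorted_items_eq (ps : List (String × String)) :
    PySem.List.sorted ((braRoles ps).map (fun r => (r, braG ps r))) (fun it => it.1)
      = (PySem.List.sorted (braRoles ps) (fun r => r)).map (fun r => (r, braG ps r)) := by
  apply PySem.List.sorted_eq_of_perm_of_pairwise_lt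
  · exact (PySem.List.sorted_perm (braRoles ps) (fun r => r) false).map _
  · exact List.pairwise_map.mpr (sortedRoles_pairwise_lt ps)

lemma A_eq_canon (entries : List (List (String × String))) :
    build_artifact_roles entries = braCanon (braPairs entries) := by
  show (PySem.List.sorted ((entries.foldl braStepA (PySem.Dict.mk [])).items) (fun it => it.1)).map
      (fun it => (it.1, PySem.List.sorted it.2 (fun p => p))) = _
  rw [foldl_braStepA, items_foldl_braStep', sorted_items_eq, List.map_map]
  rfl

-- Python's tuple comparison on (role, path) is the lexicographic order on String × String
lemma lex_before (a b : String × String) :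
    (decide (a.1 < b.1) || (!decide (b.1 < a.1) && decide (a.2 < b.2)))
      = decide ((toLex a : Lex (String × String)) < toLex b) := by
  have hiff : ((toLex a : Lex (String × String)) < toLex b) ↔ (a.1 < b.1 ∨ (a.1 = b.1 ∧ a.2 < b.2)) :=
    Prod.Lex.lt_iff
  rw [decide_eq_decide.mpr hiff]
  · rcases lt_trichotomy a.1 b.1 with h | h | h
    · simp [h]
    · simp [h]
    · simp [not_lt.2 h.le, h, h.ne']
  · infer_instance

lemma sorted2_eq_sorted_lex (ps : List (String × String)) :
    PySem.List.sorted2 ps (fun rp => rp.1) (fun rp => rp.2)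
      = PySem.List.sorted ps (fun rp => (toLex rp : Lex (String × String))) := by
  rw [PySem.List.sorted_eq_foldl_insertBy]
  unfold PySem.List.sorted2
  simp only [if_neg (by decide : ¬ (false = true))]
  congr 1
  funext acc x
  congr 1
  funext a b
  exact lex_before a b

lemma braG_map_eq_filter (ps : List (String × String)) (r : String) :
    (braG ps r).map (fun p => (r, p)) = ps.filter (fun rp => rp.1 == r) := by
  unfold braG
  rw [List.map_map]
  have h : ∀ rp ∈ ps.filter (fun rp => rp.1 == r),
      ((fun p => (r, p)) ∘ (·.2)) rp = id rp := by
    intro rp hrp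
    have h2 := (List.mem_filter.mp hrp).2
    have h1 : rp.1 = r := by simpa using h2
    simp [← h1]
  rw [List.map_congr_left h, List.map_id]

-- a list is, up to permutation, the concatenation of its fibres over any covering
-- list of distinct keys
lemma perm_flatMap_filter (rs : List String) :
    ∀ ps : List (String × String), rs.Nodup → (∀ p ∈ ps, p.1 ∈ rs) →
    ps.Perm (rs.flatMap (fun r => ps.filter (fun rp => rp.1 == r))) := by
  induction rs with
  | nil =>
    intro ps _ hcov
    cases ps with
    | nil => simp
    | cons p t => exact absurd (hcov p (by simp)) (by simp)
  | cons r t ih =>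
    intro ps hnd hcov
    rw [List.flatMap_cons]
    have hsplit := (List.filter_append_perm (fun rp => rp.1 == r) ps).symm
    refine hsplit.trans (List.Perm.append_left _ ?_)
    have hcov' : ∀ p ∈ ps.filter (fun rp => !(rp.1 == r)), p.1 ∈ t := by
      intro p hp
      rcases List.mem_filter.mp hp with ⟨hmem, hne⟩
      have hm := hcov p hmem
      simp at hne
      simpa [hne] using hm
    have hperm := ih (ps.filter (fun rp => !(rp.1 == r))) (List.nodup_cons.mp hnd).2 hcov'
    refine hperm.trans (List.Perm.flatMap (List.Perm.refl t) ?_)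
    intro r2 hr2
    have hner : r2 ≠ r := fun h => (List.nodup_cons.mp hnd).1 (h ▸ hr2)
    rw [List.filter_filter]
    have h : ∀ x ∈ ps, ((x.1 == r2) && !(x.1 == r)) = (x.1 == r2) := by
      intro x _
      by_cases hx : x.1 = r2 <;> simp [hx, hner]
    rw [List.filter_congr h]

lemma flat_pairwise_le (ps : List (String × String)) (rs : List String)
    (h : rs.Pairwise (· < ·)) :
    (rs.flatMap (fun r => (PySem.List.sorted (braG ps r) (fun p => p)).map (fun p => (r, p)))).Pairwise
      (fun a b => (toLex a : Lex (String × String)) ≤ toLex b) := by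
  induction rs with
  | nil => simp
  | cons r t ih =>
    rw [List.flatMap_cons, List.pairwise_append]
    refine ⟨?_, ih h.tail, ?_⟩
    · rw [List.pairwise_map]
      refine List.Pairwise.imp ?_ (PySem.List.sorted_pairwise (braG ps r) (fun p => p))
      intro p q hpq
      exact Prod.Lex.le_iff.mpr (Or.inr ⟨rfl, hpq⟩)
    · intro a ha b hb
      rcases List.mem_map.mp ha with ⟨p, _, rfl⟩
      rcases List.mem_flatMap.mp hb with ⟨r2, hr2, hb2⟩
      rcases List.mem_map.mp hb2 with ⟨q, _, rfl⟩
      exact Prod.Lex.le_iff.mpr (Or.inl ((List.pairwise_cons.mp h).1 r2 hr2))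

lemma braFlat_perm (ps : List (String × String)) : (braFlat ps).Perm ps := by
  have h1 : (braFlat ps).Perm ((braRoles ps).flatMap (fun r => ps.filter (fun rp => rp.1 == r))) := by
    refine List.Perm.flatMap (PySem.List.sorted_perm (braRoles ps) (fun r => r) false) ?_
    intro r _
    have hp1 : ((PySem.List.sorted (braG ps r) (fun p => p)).map (fun p => (r, p))).Perm
        ((braG ps r).map (fun p => (r, p))) :=
      (PySem.List.sorted_perm (braG ps r) (fun p => p) false).map _
    rw [braG_map_eq_filter ps r] at hp1
    exact hp1
  have h2 := perm_flatMap_filter (braRoles ps) ps (PySem.List.nodup_dedup _)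
    (fun p hp => (PySem.List.mem_dedup _ _).mpr (List.mem_map_of_mem hp))
  exact h1.trans h2.symm

lemma sorted_lex_eq_flat (ps : List (String × String)) :
    PySem.List.sorted ps (fun rp => (toLex rp : Lex (String × String))) = braFlat ps := by
  refine PySem.List.eq_of_perm_of_pairwise_le_of_injective
    (fun rp : String × String => (toLex rp : Lex (String × String))) toLex.injective
    ((PySem.List.sorted_perm ps _ false).trans (braFlat_perm ps).symm) ?_ ?_
  · exact PySem.List.sorted_pairwise ps _
  · exact flat_pairwise_le ps _ (sortedRoles_pairwise_lt ps)

lemma forall_flatMap_fst {blocks : List (String × List String)} {x : String × String}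
    (hx : x ∈ blocks.flatMap (fun b => b.2.map (fun p => (b.1, p)))) :
    x.1 ∈ blocks.map (·.1) := by
  rcases List.mem_flatMap.mp hx with ⟨b, hb, hxb⟩
  rcases List.mem_map.mp hxb with ⟨p, _, rfl⟩
  exact List.mem_map.mpr ⟨b, hb, rfl⟩

-- the groupby pass undoes the flattening of nonempty blocks with distinct roles
lemma braGroup_flatMap (blocks : List (String × List String))
    (hne : ∀ b ∈ blocks, b.2 ≠ []) (hnd : blocks.Pairwise (fun a b => a.1 ≠ b.1)) :
    braGroup (blocks.flatMap (fun b => b.2.map (fun p => (b.1, p)))) = blocks := by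
  induction blocks with
  | nil => simp [braGroup]
  | cons b rest ih =>
    obtain ⟨r, ps⟩ := b
    cases ps with
    | nil => exact absurd rfl (hne (r, []) (by simp))
    | cons p ps' =>
      rw [List.flatMap_cons]
      simp only [List.map_cons, List.cons_append]
      rw [braGroup]
      have hall : ∀ x ∈ ps'.map (fun p => (r, p)), (fun rp : String × String => rp.1 == r) x = true := by
        intro x hx
        rcases List.mem_map.mp hx with ⟨q, _, rfl⟩
        simp
      have hrest : ∀ x ∈ rest.flatMap (fun b => b.2.map (fun p => (b.1, p))),
          (fun rp : String × String => rp.1 == r) x = false := by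
        intro x hx
        have h1 := forall_flatMap_fst hx
        rcases List.mem_map.mp h1 with ⟨b2, hb2, hfst⟩
        have : b2.1 ≠ r := fun h => ((List.pairwise_cons.mp hnd).1 b2 hb2 h.symm)
        simp [← hfst, this]
      have htw : (rest.flatMap (fun b => b.2.map (fun p => (b.1, p)))).takeWhile
          (fun rp => rp.1 == r) = [] := by
        cases hrf : rest.flatMap (fun b => b.2.map (fun p => (b.1, p))) with
        | nil => rfl
        | cons y t =>
          refine List.takeWhile_cons_of_neg ?_
          simp [hrest y (by rw [hrf]; simp)]
      have hdw : (rest.flatMap (fun b => b.2.map (fun p => (b.1, p)))).dropWhile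
          (fun rp => rp.1 == r) = rest.flatMap (fun b => b.2.map (fun p => (b.1, p))) := by
        cases hrf : rest.flatMap (fun b => b.2.map (fun p => (b.1, p))) with
        | nil => rfl
        | cons y t =>
          refine List.dropWhile_cons_of_neg ?_
          simp [hrest y (by rw [hrf]; simp)]
      have htake : (ps'.map (fun p => (r, p)) ++ rest.flatMap (fun b => b.2.map (fun p => (b.1, p)))).takeWhile
          (fun rp => rp.1 == r) = ps'.map (fun p => (r, p)) := by
        rw [List.takeWhile_append, List.takeWhile_eq_self_iff.mpr hall, if_pos rfl, htw,
          List.append_nil]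
      have hdrop : (ps'.map (fun p => (r, p)) ++ rest.flatMap (fun b => b.2.map (fun p => (b.1, p)))).dropWhile
          (fun rp => rp.1 == r) = rest.flatMap (fun b => b.2.map (fun p => (b.1, p))) := by
        rw [List.dropWhile_append, List.dropWhile_eq_nil_iff.mpr (fun x hx => hall x hx),
          List.isEmpty_nil, if_pos rfl, hdw]
      have hmap : (ps'.map (fun p => (r, p))).map (fun rp : String × String => rp.2) = ps' := by
        simp
      rw [htake, hdrop, hmap, ih (fun b hb => hne b (by simp [hb])) (List.pairwise_cons.mp hnd).2]

lemma B_eq_canon (entries : List (List (String × String))) :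
    build_artifact_roles_alt entries = braCanon (braPairs entries) := by
  show braGroup (PySem.List.sorted2 (entries.foldl
      (fun acc e => match braValid? e with | some rp => acc ++ [rp] | none => acc) [])
      (fun rp => rp.1) (fun rp => rp.2)) = _
  rw [foldl_braAppend, List.nil_append, sorted2_eq_sorted_lex, sorted_lex_eq_flat]
  have hflat : braFlat (braPairs entries)
      = (braCanon (braPairs entries)).flatMap (fun b => b.2.map (fun p => (b.1, p))) := by
    unfold braFlat braCanon
    rw [List.flatMap_map]
  rw [hflat]
  refine braGroup_flatMap _ ?_ ?_
  · intro b hb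
    unfold braCanon at hb
    rcases List.mem_map.mp hb with ⟨r, hr, rfl⟩
    have hr2 : r ∈ braRoles (braPairs entries) :=
      (PySem.List.sorted_perm _ _ false).mem_iff.mp hr
    have hr3 : r ∈ (braPairs entries).map (·.1) := (PySem.List.mem_dedup _ _).mp hr2
    rcases List.mem_map.mp hr3 with ⟨rp, hrp, rfl⟩
    have hmem : rp.2 ∈ braG (braPairs entries) rp.1 :=
      List.mem_map_of_mem (List.mem_filter.mpr ⟨hrp, by simp⟩)
    intro h
    have hnil : braG (braPairs entries) rp.1 = [] :=
      (PySem.List.sorted_eq_nil_iff _ _ _).mp h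
    rw [hnil] at hmem
    exact (List.not_mem_nil) hmem
  · unfold braCanon
    rw [List.pairwise_map]
    exact (sortedRoles_pairwise_lt _).imp (fun h => ne_of_lt h)

-- ===== VERDICT (by name: the statement is the Claim_ definition above) =====
theorem build_artifact_roles_spec : Claim_equal_build_artifact_roles := by
  intro entries _
  unfold Spec_build_artifact_roles
  rw [A_eq_canon, B_eq_canon]
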